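-- pv_equiv track=rewrite | github.com/alexanderpils/fixkostenzuschuss | fixkostenzuschuss/function_new.py | _valid_combination
-- ===== SOURCE A (Python) =====
-- from typing import List, Tuple, Union
--
-- def _valid_combination(arr: Union[List[int], Tuple[int, ...]]) -> bool:
--     """Checks if the vector arr is a possible month combination for the governmental support.
--     This means the vector is only allowed to have two consecutive periods e.g. [2,3,4,6,7,8]
--
--     Args:
--         arr (Union[List[int], Tuple[int, ...]]): A Vector with numerated month combination
--
--     Returns:
--         bool: If it is a valid combination or not
--     """
--     arr = sorted(arr)
--     gap_counter = 0
--     if len(arr) > 2: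
--         for i in range(len(arr) - 1):
--             if arr[i + 1] - arr[i] > 1:
--                 gap_counter += 1
--     return gap_counter <= 1
-- ===== SOURCE B (Python) =====
-- def _valid_combination(arr):
--     s = set(arr)
--     runs = sum(1 for x in s if x - 1 not in s)
--     return runs <= 2
-- ===== Notes on version B (the rewrite author's own statement) =====
-- stated objective: alternative
-- what changed: Replaces sort-then-scan adjacent-gap counting with a set-based count of run starts (elements x with x-1 not in the set), returning True iff there are at most two runs; no sorting.
import Mathlib
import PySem

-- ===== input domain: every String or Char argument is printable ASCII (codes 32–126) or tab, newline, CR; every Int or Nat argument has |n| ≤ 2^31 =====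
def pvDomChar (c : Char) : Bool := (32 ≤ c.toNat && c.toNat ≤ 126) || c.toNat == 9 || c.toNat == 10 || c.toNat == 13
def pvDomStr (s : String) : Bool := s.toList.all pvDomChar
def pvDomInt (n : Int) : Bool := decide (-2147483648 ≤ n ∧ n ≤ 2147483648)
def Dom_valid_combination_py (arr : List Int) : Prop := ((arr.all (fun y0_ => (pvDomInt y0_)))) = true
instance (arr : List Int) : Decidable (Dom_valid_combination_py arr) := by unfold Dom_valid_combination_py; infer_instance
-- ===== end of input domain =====

-- B replaces sort-then-scan adjacent-gap counting by a set-based count of run starts (x with x-1 not in the set); no sorting.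

-- ===== PORT A =====
def valid_combination_py (arr : List Int) : Bool :=
  let a := PySem.List.sorted arr (fun x => x) false
  let gap_counter : Int :=
    if a.length > 2 then
      (PySem.List.pyRange 0 ((a.length : Int) - 1) 1).foldl
        (fun g i => if PySem.List.pyGetD a (i + 1) 0 - PySem.List.pyGetD a i 0 > 1 then g + 1 else g) 0
    else 0
  decide (gap_counter ≤ 1)

-- ===== PORT B =====
def valid_combination_py_alt (arr : List Int) : Bool :=
  let s : PySem.Set Int := PySem.Set.ofList arr
  let runs : Int := s.foldl (fun r x => if !(PySem.Set.contains s (x - 1)) then r + 1 else r) 0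
  decide (runs ≤ 2)

-- ===== PRECONDITION & SPEC =====
def Spec_valid_combination_py (arr : List Int) (out : Bool) : Prop := out = valid_combination_py_alt arr
instance (arr : List Int) (out : Bool) : Decidable (Spec_valid_combination_py arr out) := by unfold Spec_valid_combination_py; infer_instance

-- ===== CLAIM (what is proved, stated in full; the proofs are below) =====
def Claim_equal_valid_combination_py : Prop := ∀ (arr : List Int), Dom_valid_combination_py arr → Spec_valid_combination_py arr (valid_combination_py arr)

-- ===== LEMMAS AND PROOFS =====

/-- Number of strict jumps (> 1) between adjacent elements. -/
def pvGaps : List Int → Nat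
  | a :: b :: r => (if b - a > 1 then 1 else 0) + pvGaps (b :: r)
  | _ => 0

/-- Collapse adjacent duplicates (a strict dedup for sorted lists). -/
def pvDdup : List Int → List Int
  | a :: b :: r => if a = b then pvDdup (b :: r) else a :: pvDdup (b :: r)
  | l => l

theorem pv_countP_range_gaps : (t : List Int) →
    (List.range (t.length - 1)).countP (fun k => decide (t.getD (k+1) 0 - t.getD k 0 > 1)) = pvGaps t
  | [] => by simp [pvGaps]
  | [a] => by simp [pvGaps]
  | a :: b :: r => by
    have ih := pv_countP_range_gaps (b :: r)
    simp only [List.length_cons, Nat.add_sub_cancel] at ih ⊢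
    rw [List.range_succ_eq_map, List.countP_cons, List.countP_map]
    have hpred : ((fun k => decide ((a::b::r).getD (k+1) 0 - (a::b::r).getD k 0 > 1)) ∘ Nat.succ)
        = (fun k => decide ((b::r).getD (k+1) 0 - (b::r).getD k 0 > 1)) := by
      funext k
      simp [Function.comp]
    rw [hpred, ih]
    simp only [pvGaps, List.getD_cons_succ, List.getD_cons_zero]
    by_cases hg : b - a > 1 <;> (simp [hg]; try omega)

theorem pv_mem_ddup : ∀ (t : List Int) (x : Int), x ∈ pvDdup t ↔ x ∈ t
  | [], x => by simp [pvDdup]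
  | [a], x => by simp [pvDdup]
  | a :: b :: r, x => by
    have ih := pv_mem_ddup (b :: r) x
    by_cases h : a = b
    · subst h
      rw [show pvDdup (a::a::r) = pvDdup (a::r) from by simp [pvDdup]]
      rw [ih]
      simp
    · simp [pvDdup, h, ih]

theorem pv_ddup_head : ∀ (b : Int) (r : List Int), ∃ r', pvDdup (b :: r) = b :: r'
  | b, [] => ⟨[], rfl⟩
  | b, c :: r => by
    by_cases h : b = c
    · subst h
      obtain ⟨r', hr⟩ := pv_ddup_head b r
      exact ⟨r', by rw [show pvDdup (b::b::r) = pvDdup (b::r) from by simp [pvDdup], hr]⟩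
    · exact ⟨pvDdup (c :: r), by simp [pvDdup, h]⟩

theorem pv_gaps_ddup : ∀ (t : List Int), t.Pairwise (· ≤ ·) → pvGaps (pvDdup t) = pvGaps t
  | [], _ => rfl
  | [a], _ => rfl
  | a :: b :: r, h => by
    have ih := pv_gaps_ddup (b :: r) h.tail
    by_cases hab : a = b
    · subst hab
      simp [pvDdup, ih, pvGaps]
    · obtain ⟨r', hr⟩ := pv_ddup_head b r
      rw [show pvDdup (a::b::r) = a :: pvDdup (b::r) from by simp [pvDdup, hab], hr]
      have h2 : pvGaps (b :: r') = pvGaps (b :: r) := by rw [← hr, ih]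
      simp only [pvGaps, h2]

theorem pv_pairwise_lt_ddup : ∀ (t : List Int), t.Pairwise (· ≤ ·) → (pvDdup t).Pairwise (· < ·)
  | [], _ => List.Pairwise.nil
  | [a], _ => by simp [pvDdup]
  | a :: b :: r, h => by
    have ih := pv_pairwise_lt_ddup (b :: r) h.tail
    by_cases hab : a = b
    · simpa [pvDdup, hab] using ih
    · have hle := (List.pairwise_cons.mp h).1
      have hb : a < b := lt_of_le_of_ne (hle b (by simp)) hab
      have hbr := (List.pairwise_cons.mp h.tail).1
      simp only [pvDdup, if_neg hab]
      refine List.pairwise_cons.mpr ⟨fun x hx => ?_, ih⟩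
      have hx' : x ∈ b :: r := (pv_mem_ddup (b :: r) x).mp hx
      rcases List.mem_cons.mp hx' with rfl | hx''
      · exact hb
      · exact lt_of_lt_of_le hb (hbr x hx'')

theorem pv_runs_strict : (x : Int) → (r : List Int) → ((x :: r).Pairwise (· < ·)) →
    (x :: r).countP (fun z => !decide (z - 1 ∈ x :: r)) = pvGaps (x :: r) + 1
  | x, [], _ => by simp [pvGaps]
  | x, y :: r, h => by
    have hxy : x < y := (List.pairwise_cons.mp h).1 y (by simp)
    have hxr : ∀ z ∈ y :: r, x < z := (List.pairwise_cons.mp h).1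
    have hyr : ∀ z ∈ r, y < z := (List.pairwise_cons.mp h.tail).1
    have ih := pv_runs_strict y r h.tail
    -- the head x is always a run start
    have hx : (x - 1 ∈ x :: y :: r) = False := by
      simp only [eq_iff_iff, iff_false]
      intro hm
      rcases List.mem_cons.mp hm with h1 | hm'
      · omega
      · exact absurd (hxr _ hm') (by omega)
    -- inside the tail, only z = y can have z - 1 = x
    have htail : ∀ z ∈ r, (!decide (z - 1 ∈ x :: y :: r)) = (!decide (z - 1 ∈ y :: r)) := by
      intro z hz
      have hzy : y < z := hyr z hz
      simp only [List.mem_cons]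
      have : ¬ (z - 1 = x) := by
        have := hxy; omega
      simp [this]
    have hy_d : (!decide (y - 1 ∈ x :: y :: r)) = (decide (y - x > 1)) := by
      have h1 : ¬ (y - 1 = y) := by omega
      have h2 : ¬ (y - 1 ∈ r) := fun hm => absurd (hyr _ hm) (by omega)
      by_cases hg : y - x > 1
      · have : ¬ (y - 1 = x) := by omega
        simp [List.mem_cons, this, h1, h2, hg]
      · have : y - 1 = x := by omega
        simp [List.mem_cons, this, hg]
    have hy_t : (!decide (y - 1 ∈ y :: r)) = true := by
      have h1 : ¬ (y - 1 = y) := by omega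
      have h2 : ¬ (y - 1 ∈ r) := fun hm => absurd (hyr _ hm) (by omega)
      simp [List.mem_cons, h1, h2]
    rw [List.countP_cons, List.countP_cons]
    rw [List.countP_congr (fun z hz => by rw [htail z hz])]
    rw [List.countP_cons] at ih
    simp only [hy_d, hy_t, hx] at *
    simp only [pvGaps]
    by_cases hg : y - x > 1 <;> simp [hg] at * <;> omega

theorem pv_gaps_le : ∀ (t : List Int), t ≠ [] → pvGaps t + 1 ≤ t.length
  | [], h => absurd rfl h
  | [a], _ => by simp [pvGaps]
  | a :: b :: r, _ => by
    have ih := pv_gaps_le (b :: r) (by simp)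
    simp only [pvGaps, List.length_cons] at *
    split <;> omega

theorem pv_fold_gaps (t : List Int) :
    (PySem.List.pyRange 0 ((t.length : Int) - 1) 1).foldl
      (fun g i => if PySem.List.pyGetD t (i + 1) 0 - PySem.List.pyGetD t i 0 > 1 then g + 1 else g) (0:Int)
    = (pvGaps t : Int) := by
  rw [PySem.List.foldl_ite_add_one, PySem.List.pyRange_one, List.countP_map]
  have hc : ((fun i => decide (PySem.List.pyGetD t (i + 1) 0 - PySem.List.pyGetD t i 0 > 1)) ∘ (fun k : Nat => (0:Int) + k))
      = (fun k : Nat => decide (t.getD (k+1) 0 - t.getD k 0 > 1)) := by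
    funext k
    simp only [Function.comp_apply, zero_add, PySem.List.pyGetD_natCast]
    have h1 : ((k:Int) + 1) = ((k+1 : Nat) : Int) := by push_cast; ring
    rw [h1, PySem.List.pyGetD_natCast]
  rw [hc]
  have h2 : (((t.length : Int) - 1 - 0)).toNat = t.length - 1 := by omega
  rw [h2, pv_countP_range_gaps t]
  simp

theorem pv_alt_runs (arr : List Int) (h : arr ≠ []) :
    (PySem.Set.ofList arr).countP (fun x => !(PySem.Set.contains (PySem.Set.ofList arr) (x - 1)))
    = pvGaps (PySem.List.sorted arr (fun x => x) false) + 1 := by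
  have hpw : (PySem.List.sorted arr (fun x => x) false).Pairwise (· ≤ ·) :=
    PySem.List.sorted_pairwise arr (fun x => x)
  have hlt := pv_pairwise_lt_ddup _ hpw
  have hnd : (pvDdup (PySem.List.sorted arr (fun x => x) false)).Nodup :=
    hlt.imp (fun hab => ne_of_lt hab)
  have hmem : ∀ y : Int, y ∈ pvDdup (PySem.List.sorted arr (fun x => x) false) ↔ y ∈ arr := by
    intro y
    rw [pv_mem_ddup, PySem.List.mem_sorted]
  have hperm : (PySem.Set.ofList arr).Perm (pvDdup (PySem.List.sorted arr (fun x => x) false)) :=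
    (List.perm_ext_iff_of_nodup (PySem.Set.nodup_ofList arr) hnd).mpr
      (fun y => by rw [PySem.Set.mem_ofList, hmem])
  rw [hperm.countP_eq]
  have hp : (fun x => !(PySem.Set.contains (PySem.Set.ofList arr) (x - 1)))
      = (fun x : Int => !decide (x - 1 ∈ pvDdup (PySem.List.sorted arr (fun x => x) false))) := by
    funext x
    rw [PySem.Set.contains_eq_decide]
    exact congrArg (fun b => !b) (decide_eq_decide.mpr (by rw [PySem.Set.mem_ofList, hmem]))
  rw [hp]
  -- expose the cons shape of the sorted list, then of its dedup
  have hs : PySem.List.sorted arr (fun x => x) false ≠ [] := by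
    intro hnil
    rcases List.exists_mem_of_ne_nil arr h with ⟨x, hx⟩
    have := (PySem.List.mem_sorted arr (fun x => x) false x).mpr hx
    rw [hnil] at this
    exact absurd this (List.not_mem_nil)
  rcases List.exists_cons_of_ne_nil hs with ⟨a, t', hcons⟩
  rw [hcons] at hlt ⊢
  rcases pv_ddup_head a t' with ⟨r', hr⟩
  rw [hr] at hlt ⊢
  rw [pv_runs_strict a r' hlt, ← hr, pv_gaps_ddup _ (hcons ▸ hpw)]

theorem pv_gaps_sorted_le (arr : List Int) (h : arr ≠ [])
    (hlen : ¬ (PySem.List.sorted arr (fun x => x) false).length > 2) :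
    pvGaps (PySem.List.sorted arr (fun x => x) false) ≤ 1 := by
  have hs : PySem.List.sorted arr (fun x => x) false ≠ [] := by
    intro hnil
    rcases List.exists_mem_of_ne_nil arr h with ⟨x, hx⟩
    have := (PySem.List.mem_sorted arr (fun x => x) false x).mpr hx
    rw [hnil] at this
    exact absurd this (List.not_mem_nil)
  have := pv_gaps_le _ hs
  omega

-- ===== VERDICT (by name: the statement is the Claim_ definition above) =====
theorem valid_combination_py_spec : Claim_equal_valid_combination_py := by
  intro arr _
  unfold Spec_valid_combination_py valid_combination_py valid_combination_py_alt
  rcases eq_or_ne arr [] with rfl | hne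
  · decide
  · simp only [pv_fold_gaps, PySem.List.foldl_if_add_one, pv_alt_runs arr hne]
    by_cases hlen : (PySem.List.sorted arr (fun x => x) false).length > 2
    · rw [if_pos hlen]
      apply decide_eq_decide.mpr
      push_cast
      omega
    · rw [if_neg hlen]
      have := pv_gaps_sorted_le arr hne hlen
      apply decide_eq_decide.mpr
      push_cast
      simp only [true_iff]
      omega
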